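-- pv_equiv track=rewrite | github.com/gyeonse0/new-multi-modal | ALNS-master/examples/Repair.py | drone_repair_visit_type_update
-- ===== SOURCE A (Python) =====
-- IDLE = 0 # 해당 노드에 드론이 트럭에 업힌 상태의 경우
--
-- FLY = 1 # 해당 노드에서 트럭이 드론의 임무를 위해 드론을 날려주는 경우
--
-- ONLY_DRONE = 2 # 해당 노드에 드론만이 임무를 수행하는 서비스 노드인 경우
--
-- CATCH = 3 # 해당 노드에서 트럭이 임무를 마친 드론을 받는 경우
--
-- ONLY_TRUCK = 4 # 해당 노드에서 트럭만이 임무를 수행하는 경우 (드론이 업혀있지 않음)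
--
-- def drone_repair_visit_type_update(routes):
--     """
--     visit_type update 함수
--     """
--
--     for i, route in enumerate(routes):
--         for j in range(1,len(route)):
--             if route[j][1] is None:
--                 route[j] = (route[j][0], ONLY_DRONE)
--                 k = j - 1  # 현재 노드의 이전 노드부터 시작
--                 while k >= 0:
--                     if route[k][1] is not None and route[k][1] is not ONLY_DRONE and route[k][1] is not ONLY_TRUCK:  # 이전 노드가 None이 아닌 경우
--                         if route[k][1] == IDLE:
--                             route[k] = (route[k][0], FLY)
--                         elif route[k][1] == FLY:
--                             route[k] = (route[k][0], FLY)
--                         elif route[k][1] == CATCH: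
--                             route[k] = (route[k][0], FLY)
--                         break  # 노드의 상태를 설정했으므로 루프를 종료합니다.
--                     k -= 1  # k를 감소하여 이전 노드로 이동
--
--                 l = j + 1
--                 while l < len(route):
--                     if route[l][1] is not None and route[l][1] is not ONLY_DRONE and route[l][1] is not ONLY_TRUCK:
--                         if route[l][1] == IDLE:
--                             route[l] = (route[l][0], CATCH)
--                         elif route[l][1] == FLY:
--                             route[l] = (route[l][0], FLY)
--                         elif route[l][1] == CATCH:
--                             route[l] = (route[l][0], CATCH)
--                         break  # 노드의 상태를 설정했으므로 루프를 종료합니다.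
--                     l += 1  # k를 감소하여 이전 노드로 이동
--
--     return routes
-- ===== SOURCE B (Python) =====
-- ONLY_DRONE = 2
--
-- def drone_repair_visit_type_update(routes):
--     """
--     One pass per route (plus a precomputed next-eligible index), O(n) instead of
--     A's nested rescans.  Mutates the routes in place like A and returns them.
--     """
--     for route in routes:
--         n = len(route)
--         # next eligible index after each position (eligibility never changes)
--         nxt = [None] * n
--         ne = None
--         for j in range(n - 1, -1, -1):
--             nxt[j] = ne
--             v = route[j][1]
--             if v is not None and v != 2 and v != 4:
--                 ne = j
--         prev = None
--         for j in range(n):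
--             v = route[j][1]
--             if v is None and j >= 1:
--                 route[j] = (route[j][0], ONLY_DRONE)
--                 if prev is not None:
--                     pv = route[prev][1]
--                     if pv == 0 or pv == 1 or pv == 3:
--                         route[prev] = (route[prev][0], 1)
--                 m = nxt[j]
--                 if m is not None:
--                     mv = route[m][1]
--                     if mv == 0 or mv == 3:
--                         route[m] = (route[m][0], 3)
--             elif v is not None and v != 2 and v != 4:
--                 prev = j
--     return routes
-- ===== Notes on version B (the rewrite author's own statement) =====
-- stated objective: alternative
-- what changed: Replaces A's per-drone-node bidirectional rescans with one left-to-right pass that tracks the nearest previous eligible node plus a precomputed next-eligible index array (eligibility is invariant under the updates), removing the nested scans; O(n^2) worst case becomes O(n) per route.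
import Mathlib
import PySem

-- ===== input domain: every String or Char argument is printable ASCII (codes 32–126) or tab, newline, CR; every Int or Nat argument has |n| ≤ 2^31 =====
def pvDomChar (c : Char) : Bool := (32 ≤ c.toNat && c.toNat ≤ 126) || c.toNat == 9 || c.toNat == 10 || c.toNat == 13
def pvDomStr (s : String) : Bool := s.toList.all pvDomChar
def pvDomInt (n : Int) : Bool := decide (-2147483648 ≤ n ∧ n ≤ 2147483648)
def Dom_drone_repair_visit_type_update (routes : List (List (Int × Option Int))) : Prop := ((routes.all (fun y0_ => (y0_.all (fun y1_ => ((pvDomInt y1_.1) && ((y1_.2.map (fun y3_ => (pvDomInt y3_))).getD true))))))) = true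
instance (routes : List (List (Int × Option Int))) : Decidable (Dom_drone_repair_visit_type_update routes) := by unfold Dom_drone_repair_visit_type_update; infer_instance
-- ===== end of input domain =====

-- B replaces A's per-drone-node bidirectional rescans by one pass with a tracked previous-eligible
-- index and a precomputed next-eligible array (alternative algorithm; A mutates the routes in place,
-- B performs the same in-place mutation in Python; the equivalence proved is about the return value).


-- ===== PORT A =====
-- A's inner backward while-loop: k runs j-1, j-2, …, 0 (argument here is k+1; 0 means k = -1).
def aBack (r : List (Int × Option Int)) : Nat → List (Int × Option Int)
  | 0 => r
  | k + 1 =>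
    match r[k]? with
    | some (x, v) =>
      if v ≠ none ∧ v ≠ some 2 ∧ v ≠ some 4 then
        if v = some 0 then r.set k (x, some 1)
        else if v = some 1 then r.set k (x, some 1)
        else if v = some 3 then r.set k (x, some 1)
        else r
      else aBack r k
    | none => r

-- A's inner forward while-loop: while l < len(route).
def aFwd (r : List (Int × Option Int)) (l : Nat) : List (Int × Option Int) :=
  if _h : l < r.length then
    match r[l]? with
    | some (x, v) =>
      if v ≠ none ∧ v ≠ some 2 ∧ v ≠ some 4 then
        if v = some 0 then r.set l (x, some 3)
        else if v = some 1 then r.set l (x, some 1)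
        else if v = some 3 then r.set l (x, some 3)
        else r
      else aFwd r (l + 1)
    | none => r
  else r
termination_by r.length - l

-- body of A's inner for-loop over j
def aStep (r : List (Int × Option Int)) (j : Nat) : List (Int × Option Int) :=
  match r[j]? with
  | some (x, none) =>
    let r1 := r.set j (x, some 2)
    let r2 := aBack r1 j
    aFwd r2 (j + 1)
  | _ => r

def drone_repair_visit_type_update (routes : List (List (Int × Option Int))) : List (List (Int × Option Int)) :=
  routes.map (fun route => (List.range' 1 (route.length - 1)).foldl aStep route)

-- ===== PORT B =====
def bElig (v : Option Int) : Bool :=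
  match v with
  | none => false
  | some x => decide (x ≠ 2) && decide (x ≠ 4)

-- B's first (right-to-left) pass: next-eligible index after each position.
-- Returns (nxt entries for this suffix, index of first eligible node of the suffix).
def bNxtAux : List (Int × Option Int) → Nat → List (Option Nat) × Option Nat
  | [], _ => ([], none)
  | (_, v) :: rest, base =>
    let p := bNxtAux rest (base + 1)
    (p.2 :: p.1, if bElig v then some base else p.2)

-- body of B's second (left-to-right) pass; state = (route so far, nearest previous eligible index)
def bStep (nxt : List (Option Nat)) (st : List (Int × Option Int) × Option Nat) (j : Nat) :
    List (Int × Option Int) × Option Nat :=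
  match st.1[j]? with
  | some (x, none) =>
    if 1 ≤ j then
      let r1 := st.1.set j (x, some 2)
      let r2 :=
        match st.2 with
        | some p =>
          match r1[p]? with
          | some (y, pv) => if pv = some 0 ∨ pv = some 1 ∨ pv = some 3 then r1.set p (y, some 1) else r1
          | none => r1
        | none => r1
      let r3 :=
        match nxt[j]? with
        | some (some m) =>
          match r2[m]? with
          | some (y, mv) => if mv = some 0 ∨ mv = some 3 then r2.set m (y, some 3) else r2
          | none => r2
        | _ => r2
      (r3, st.2)
    else st
  | some (_, some v) => if v ≠ 2 ∧ v ≠ 4 then (st.1, some j) else st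
  | none => st

def bRoute (r : List (Int × Option Int)) : List (Int × Option Int) :=
  ((List.range r.length).foldl (bStep (bNxtAux r 0).1) (r, none)).1

def drone_repair_visit_type_update_alt (routes : List (List (Int × Option Int))) : List (List (Int × Option Int)) :=
  routes.map bRoute

-- ===== PRECONDITION & SPEC =====
def Spec_drone_repair_visit_type_update (routes : List (List (Int × Option Int))) (out : List (List (Int × Option Int))) : Prop := out = drone_repair_visit_type_update_alt routes
instance (routes : List (List (Int × Option Int))) (out : List (List (Int × Option Int))) : Decidable (Spec_drone_repair_visit_type_update routes out) := by unfold Spec_drone_repair_visit_type_update; infer_instance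

-- ===== CLAIM (what is proved, stated in full; the proofs are below) =====
def Claim_equal_drone_repair_visit_type_update : Prop := ∀ (routes : List (List (Int × Option Int))), Dom_drone_repair_visit_type_update routes → Spec_drone_repair_visit_type_update routes (drone_repair_visit_type_update routes)

-- ===== LEMMAS AND PROOFS =====

-- eligibility of position i in the current list
def eligAt (r : List (Int × Option Int)) (i : Nat) : Bool :=
  match r[i]? with
  | some (_, v) => bElig v
  | none => false

-- largest eligible index < t
def maxEL (r : List (Int × Option Int)) : Nat → Option Nat
  | 0 => none
  | k + 1 => if eligAt r k then some k else maxEL r k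

-- smallest eligible index ≥ l
def minEG (r : List (Int × Option Int)) (l : Nat) : Option Nat :=
  if _h : l < r.length then (if eligAt r l then some l else minEG r (l + 1)) else none
termination_by r.length - l

-- first eligible index of a list
def firstB : List (Int × Option Int) → Option Nat
  | [] => none
  | (_, v) :: rest => if bElig v then some 0 else (firstB rest).map (· + 1)

def backUpd (r : List (Int × Option Int)) (p : Nat) : List (Int × Option Int) :=
  match r[p]? with
  | some (y, pv) => if pv = some 0 ∨ pv = some 1 ∨ pv = some 3 then r.set p (y, some 1) else r
  | none => r

def fwdUpd (r : List (Int × Option Int)) (m : Nat) : List (Int × Option Int) :=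
  match r[m]? with
  | some (y, mv) => if mv = some 0 ∨ mv = some 3 then r.set m (y, some 3) else r
  | none => r

theorem set_self (r : List (Int × Option Int)) (m : Nat) (a : Int × Option Int)
    (h : r[m]? = some a) : r.set m a = r := by
  have hm : m < r.length := (List.getElem?_eq_some_iff.mp h).1
  apply List.ext_getElem?
  intro j
  rw [List.getElem?_set]
  by_cases hj : m = j
  · subst hj; simp [hm, h.symm]
  · simp [hj]


theorem back_eq (r : List (Int × Option Int)) (t : Nat) (ht : t ≤ r.length) :
    aBack r t = (match maxEL r t with | none => r | some p => backUpd r p) := by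
  induction t with
  | zero => rfl
  | succ k ih =>
    have hk : k < r.length := ht
    have hget : r[k]? = some r[k] := List.getElem?_eq_getElem hk
    rcases hp : r[k] with ⟨x, v⟩
    have hget' : r[k]? = some (x, v) := by rw [hget, hp]
    have he : eligAt r k = bElig v := by simp [eligAt, hget']
    simp only [aBack, hget', maxEL, he]
    by_cases hb : bElig v = true
    · have hcond : v ≠ none ∧ v ≠ some 2 ∧ v ≠ some 4 := by
        cases v with
        | none => simp [bElig] at hb
        | some w =>
          simp only [bElig, Bool.and_eq_true, decide_eq_true_eq] at hb
          simp [hb.1, hb.2]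
      rw [if_pos hcond, hb, if_pos rfl]
      show _ = backUpd r k
      unfold backUpd
      rw [hget']
      obtain ⟨-, h2, h4⟩ := hcond
      rcases v with - | w
      · simp
      · by_cases h0 : w = 0
        · subst h0; simp
        · by_cases h1 : w = 1
          · subst h1; simp
          · by_cases h3 : w = 3
            · subst h3; simp [h0, h1]
            · simp [h0, h1, h3]
    · have hcond : ¬ (v ≠ none ∧ v ≠ some 2 ∧ v ≠ some 4) := by
        cases v with
        | none => simp
        | some w =>
          simp only [bElig, Bool.and_eq_true, decide_eq_true_eq] at hb
          by_cases h2 : w = 2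
          · simp [h2]
          · have h4 : w = 4 := by tauto
            simp [h4]
      rw [if_neg hcond, (Bool.not_eq_true _).mp hb, if_neg (by simp)]
      exact ih (by omega)

theorem fwd_eq (r : List (Int × Option Int)) (l : Nat) :
    aFwd r l = (match minEG r l with | none => r | some m => fwdUpd r m) := by
  suffices hgen : ∀ n l, r.length - l ≤ n →
      aFwd r l = (match minEG r l with | none => r | some m => fwdUpd r m) by
    exact hgen (r.length - l) l le_rfl
  intro n
  induction n with
  | zero =>
    intro l hn
    have hlt : ¬ l < r.length := by omega
    rw [aFwd]
    conv_rhs => rw [minEG]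
    simp [hlt]
  | succ n ih =>
    intro l hn
    rw [aFwd]
    conv_rhs => rw [minEG]
    by_cases hlt : l < r.length
    · have hget : r[l]? = some r[l] := List.getElem?_eq_getElem hlt
      rcases hp : r[l] with ⟨x, v⟩
      have hget' : r[l]? = some (x, v) := by rw [hget, hp]
      have he : eligAt r l = bElig v := by simp [eligAt, hget']
      simp only [hlt, dite_true, hget', he]
      by_cases hb : bElig v = true
      · have hcond : v ≠ none ∧ v ≠ some 2 ∧ v ≠ some 4 := by
          cases v with
          | none => simp [bElig] at hb
          | some w =>
            simp only [bElig, Bool.and_eq_true, decide_eq_true_eq] at hb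
            simp [hb.1, hb.2]
        rw [if_pos hcond, hb, if_pos rfl]
        show _ = fwdUpd r l
        unfold fwdUpd
        rw [hget']
        obtain ⟨-, h2, h4⟩ := hcond
        rcases v with - | w
        · simp
        · by_cases h0 : w = 0
          · subst h0; simp
          · by_cases h1 : w = 1
            · subst h1
              have : r.set l (x, some 1) = r := set_self r l (x, some 1) hget'
              simp [this]
            · by_cases h3 : w = 3
              · subst h3; simp [h0, h1]
              · simp [h0, h1, h3]
      · have hcond : ¬ (v ≠ none ∧ v ≠ some 2 ∧ v ≠ some 4) := by
          cases v with
          | none => simp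
          | some w =>
            simp only [bElig, Bool.and_eq_true, decide_eq_true_eq] at hb
            by_cases h2 : w = 2
            · simp [h2]
            · have h4 : w = 4 := by tauto
              simp [h4]
        rw [if_neg hcond, (Bool.not_eq_true _).mp hb, if_neg (by simp)]
        exact ih (l + 1) (by omega)
    · simp [hlt]

theorem maxEL_congr (r o : List (Int × Option Int)) (h : ∀ i, eligAt r i = eligAt o i) (t : Nat) :
    maxEL r t = maxEL o t := by
  induction t with
  | zero => rfl
  | succ k ih => simp [maxEL, h k, ih]


theorem minEG_congr (r o : List (Int × Option Int)) (hl : r.length = o.length)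
    (h : ∀ i, eligAt r i = eligAt o i) (l : Nat) : minEG r l = minEG o l := by
  suffices hgen : ∀ n l, o.length - l ≤ n → minEG r l = minEG o l by
    exact hgen (o.length - l) l le_rfl
  intro n
  induction n with
  | zero =>
    intro l hn
    have hro : ¬ l < r.length := by omega
    have hoo : ¬ l < o.length := by omega
    conv_lhs => rw [minEG]
    conv_rhs => rw [minEG]
    simp [hro, hoo]
  | succ n ih =>
    intro l hn
    conv_lhs => rw [minEG]
    conv_rhs => rw [minEG]
    by_cases hlt : l < o.length
    · have hlt' : l < r.length := by omega
      simp only [hlt, hlt', dite_true, h l]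
      by_cases he : eligAt o l = true
      · simp [he]
      · simp only [Bool.not_eq_true] at he
        simp [he, ih (l + 1) (by omega)]
    · have hlt' : ¬ l < r.length := by omega
      simp [hlt, hlt']


theorem maxEL_some_elig (o : List (Int × Option Int)) (t p : Nat) (h : maxEL o t = some p) :
    eligAt o p = true := by
  induction t with
  | zero => simp [maxEL] at h
  | succ k ih =>
    by_cases hk : eligAt o k = true
    · simp [maxEL, hk] at h; exact h ▸ hk
    · simp only [maxEL, hk, if_false, Bool.false_eq_true] at h
      exact ih (by simpa [maxEL, hk] using h)


theorem minEG_some_elig (o : List (Int × Option Int)) (l m : Nat) (h : minEG o l = some m) :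
    eligAt o m = true := by
  suffices hgen : ∀ n l, o.length - l ≤ n → minEG o l = some m → eligAt o m = true by
    exact hgen (o.length - l) l le_rfl h
  intro n
  induction n with
  | zero =>
    intro l hn hm
    rw [minEG] at hm
    have : ¬ l < o.length := by omega
    simp [this] at hm
  | succ n ih =>
    intro l hn hm
    rw [minEG] at hm
    by_cases hlt : l < o.length
    · simp only [hlt, dite_true] at hm
      by_cases he : eligAt o l = true
      · simp [he] at hm; exact hm ▸ he
      · simp only [Bool.not_eq_true] at he
        simp only [he, Bool.false_eq_true, if_false] at hm
        exact ih (l + 1) (by omega) hm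
    · simp [hlt] at hm


theorem bNxtAux_snd (l : List (Int × Option Int)) (base : Nat) :
    (bNxtAux l base).2 = (firstB l).map (· + base) := by
  induction l generalizing base with
  | nil => rfl
  | cons hd tl ih =>
    obtain ⟨y, v⟩ := hd
    simp only [bNxtAux, firstB]
    by_cases he : bElig v = true
    · simp [he]
    · simp only [Bool.not_eq_true] at he
      simp only [he, Bool.false_eq_true, if_false, ih (base + 1)]
      cases firstB tl <;> simp <;> omega


theorem bNxtAux_fst_get (l : List (Int × Option Int)) (base j : Nat) (hj : j < l.length) :
    (bNxtAux l base).1[j]? = some ((firstB (l.drop (j + 1))).map (· + (base + j + 1))) := by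
  induction l generalizing base j with
  | nil => simp at hj
  | cons hd tl ih =>
    obtain ⟨y, v⟩ := hd
    cases j with
    | zero =>
      simp only [bNxtAux, List.getElem?_cons_zero, List.drop_succ_cons, List.drop_zero]
      rw [bNxtAux_snd]
    | succ j =>
      simp only [bNxtAux, List.getElem?_cons_succ, List.drop_succ_cons]
      rw [ih (base + 1) j (by simpa using hj)]
      congr 1
      cases firstB (tl.drop (j + 1)) <;> simp <;> omega


theorem minEG_eq_firstB (r : List (Int × Option Int)) (k : Nat) :
    minEG r k = (firstB (r.drop k)).map (· + k) := by
  suffices hgen : ∀ n k, r.length - k ≤ n → minEG r k = (firstB (r.drop k)).map (· + k) by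
    exact hgen (r.length - k) k le_rfl
  intro n
  induction n with
  | zero =>
    intro k hn
    rw [minEG]
    have h1 : ¬ k < r.length := by omega
    have h2 : r.drop k = [] := List.drop_eq_nil_of_le (by omega)
    simp [h1, h2, firstB]
  | succ n ih =>
    intro k hn
    rw [minEG]
    by_cases hlt : k < r.length
    · have hdrop : r.drop k = r[k] :: r.drop (k + 1) := List.drop_eq_getElem_cons hlt
      have hget : r[k]? = some r[k] := List.getElem?_eq_getElem hlt
      rcases hp : r[k] with ⟨x, v⟩
      have hget' : r[k]? = some (x, v) := by rw [hget, hp]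
      have he : eligAt r k = bElig v := by simp [eligAt, hget']
      simp only [hlt, dite_true, hdrop, hp, firstB, he]
      by_cases hb : bElig v = true
      · simp [hb]
      · simp only [Bool.not_eq_true] at hb
        simp only [hb, Bool.false_eq_true, if_false, ih (k + 1) (by omega)]
        cases firstB (r.drop (k + 1)) <;> simp <;> omega
    · have h2 : r.drop k = [] := List.drop_eq_nil_of_le (by omega)
      simp [hlt, h2, firstB]




theorem backUpd_length (r : List (Int × Option Int)) (p : Nat) :
    (backUpd r p).length = r.length := by
  rcases hq : r[p]? with _ | ⟨y, pv⟩
  · simp [backUpd, hq]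
  · simp only [backUpd, hq]
    split <;> simp

theorem backUpd_get_ne (r : List (Int × Option Int)) (p i : Nat) (h : i ≠ p) :
    (backUpd r p)[i]? = r[i]? := by
  rcases hq : r[p]? with _ | ⟨y, pv⟩
  · simp [backUpd, hq]
  · simp only [backUpd, hq]
    split
    · exact List.getElem?_set_ne (fun e => h e.symm)
    · rfl

theorem backUpd_prof (r : List (Int × Option Int)) (p : Nat) (i : Nat) :
    eligAt (backUpd r p) i = eligAt r i := by
  rcases hq : r[p]? with _ | ⟨y, pv⟩
  · simp [backUpd, hq]
  · simp only [backUpd, hq]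
    split
    · rename_i hpv
      by_cases hip : i = p
      · subst hip
        have hlt : i < r.length := (List.getElem?_eq_some_iff.mp hq).1
        simp only [eligAt, List.getElem?_set_self hlt, hq]
        rcases hpv with h | h | h <;> subst h <;> simp [bElig]
      · simp [eligAt, List.getElem?_set_ne (fun e => hip e.symm)]
    · rfl

theorem fwdUpd_length (r : List (Int × Option Int)) (m : Nat) :
    (fwdUpd r m).length = r.length := by
  rcases hq : r[m]? with _ | ⟨y, mv⟩
  · simp [fwdUpd, hq]
  · simp only [fwdUpd, hq]
    split <;> simp

theorem fwdUpd_get_ne (r : List (Int × Option Int)) (m i : Nat) (h : i ≠ m) :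
    (fwdUpd r m)[i]? = r[i]? := by
  rcases hq : r[m]? with _ | ⟨y, mv⟩
  · simp [fwdUpd, hq]
  · simp only [fwdUpd, hq]
    split
    · exact List.getElem?_set_ne (fun e => h e.symm)
    · rfl

theorem fwdUpd_prof (r : List (Int × Option Int)) (m : Nat) (i : Nat) :
    eligAt (fwdUpd r m) i = eligAt r i := by
  rcases hq : r[m]? with _ | ⟨y, mv⟩
  · simp [fwdUpd, hq]
  · simp only [fwdUpd, hq]
    split
    · rename_i hmv
      by_cases him : i = m
      · subst him
        have hlt : i < r.length := (List.getElem?_eq_some_iff.mp hq).1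
        simp only [eligAt, List.getElem?_set_self hlt, hq]
        rcases hmv with h | h <;> subst h <;> simp [bElig]
      · simp [eligAt, List.getElem?_set_ne (fun e => him e.symm)]
    · rfl

theorem main_loop (m : Nat) : ∀ (o r : List (Int × Option Int)) (t : Nat) (prev : Option Nat),
    1 ≤ t →
    r.length = o.length →
    (∀ i, eligAt r i = eligAt o i) →
    (∀ i, t ≤ i → eligAt o i = false → r[i]? = o[i]?) →
    prev = maxEL o t →
    (List.range' t m).foldl aStep r = ((List.range' t m).foldl (bStep (bNxtAux o 0).1) (r, prev)).1 := by
  induction m with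
  | zero => intro o r t prev _ _ _ _ _; rfl
  | succ m ih =>
    intro o r t prev ht hl hprof hun hprev
    rw [List.range'_succ, List.foldl_cons, List.foldl_cons]
    cases hx : r[t]? with
    | none =>
      have hA : aStep r t = r := by simp [aStep, hx]
      have hB : bStep (bNxtAux o 0).1 (r, prev) t = (r, prev) := by simp [bStep, hx]
      have hot : eligAt o t = false := by rw [← hprof]; simp [eligAt, hx]
      rw [hA, hB]
      apply ih o r (t + 1) prev (by omega) hl hprof
      · intro i hi hoe; exact hun i (by omega) hoe
      · rw [hprev]; simp [maxEL, hot]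
    | some xv =>
      obtain ⟨x, v⟩ := xv
      cases v with
      | some w =>
        have hA : aStep r t = r := by simp [aStep, hx]
        by_cases hw : w ≠ 2 ∧ w ≠ 4
        · have hB : bStep (bNxtAux o 0).1 (r, prev) t = (r, some t) := by
            simp [bStep, hx, hw]
          have hot : eligAt o t = true := by
            rw [← hprof]; simp [eligAt, hx, bElig, hw.1, hw.2]
          rw [hA, hB]
          apply ih o r (t + 1) (some t) (by omega) hl hprof
          · intro i hi hoe; exact hun i (by omega) hoe
          · simp [maxEL, hot]
        · have hB : bStep (bNxtAux o 0).1 (r, prev) t = (r, prev) := by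
            simp [bStep, hx, hw]
          have hot : eligAt o t = false := by
            rw [← hprof]; simp only [eligAt, hx, bElig]
            rcases not_and_or.mp hw with h | h <;> simp [not_not.mp h]
          rw [hA, hB]
          apply ih o r (t + 1) prev (by omega) hl hprof
          · intro i hi hoe; exact hun i (by omega) hoe
          · rw [hprev]; simp [maxEL, hot]
      | none =>
        have htlen : t < r.length := (List.getElem?_eq_some_iff.mp hx).1
        have hto : t < o.length := hl ▸ htlen
        have hot : eligAt o t = false := by rw [← hprof]; simp [eligAt, hx, bElig]
        have hl1 : (r.set t (x, some 2)).length = o.length := by simp [hl]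
        have hprof1 : ∀ i, eligAt (r.set t (x, some 2)) i = eligAt o i := by
          intro i
          by_cases hit : i = t
          · subst hit
            rw [← hprof i]
            simp [eligAt, List.getElem?_set_self htlen, hx, bElig]
          · rw [← hprof i]
            simp [eligAt, List.getElem?_set_ne (fun e => hit e.symm)]
        have hback : aBack (r.set t (x, some 2)) t =
            (match maxEL o t with | none => r.set t (x, some 2) | some p => backUpd (r.set t (x, some 2)) p) := by
          rw [back_eq _ t (by simp; omega), maxEL_congr _ o hprof1]
        have hl2 : (match maxEL o t with | none => r.set t (x, some 2) | some p => backUpd (r.set t (x, some 2)) p).length = o.length := by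
          cases maxEL o t with
          | none => exact hl1
          | some p => rw [backUpd_length]; exact hl1
        have hprof2 : ∀ i, eligAt (match maxEL o t with | none => r.set t (x, some 2) | some p => backUpd (r.set t (x, some 2)) p) i = eligAt o i := by
          intro i
          cases maxEL o t with
          | none => exact hprof1 i
          | some p => rw [backUpd_prof]; exact hprof1 i
        have hget2_ne : ∀ i, t + 1 ≤ i → eligAt o i = false →
            (match maxEL o t with | none => r.set t (x, some 2) | some p => backUpd (r.set t (x, some 2)) p)[i]? = r[i]? := by
          intro i hi hoe
          have h1 : (r.set t (x, some 2))[i]? = r[i]? :=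
            List.getElem?_set_ne (fun e => by omega)
          cases hmE : maxEL o t with
          | none => exact h1
          | some p =>
            have hep : eligAt o p = true := maxEL_some_elig o t p hmE
            rw [backUpd_get_ne _ p i (fun e => by rw [e] at hoe; rw [hoe] at hep; exact Bool.false_ne_true hep)]
            exact h1
        have hfwd : aFwd (match maxEL o t with | none => r.set t (x, some 2) | some p => backUpd (r.set t (x, some 2)) p) (t + 1) =
            (match minEG o (t + 1) with
             | none => (match maxEL o t with | none => r.set t (x, some 2) | some p => backUpd (r.set t (x, some 2)) p)
             | some mm => fwdUpd (match maxEL o t with | none => r.set t (x, some 2) | some p => backUpd (r.set t (x, some 2)) p) mm) := by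
          rw [fwd_eq, minEG_congr _ o hl2 hprof2]
        have hA : aStep r t =
            (match minEG o (t + 1) with
             | none => (match maxEL o t with | none => r.set t (x, some 2) | some p => backUpd (r.set t (x, some 2)) p)
             | some mm => fwdUpd (match maxEL o t with | none => r.set t (x, some 2) | some p => backUpd (r.set t (x, some 2)) p) mm) := by
          simp only [aStep, hx]
          show aFwd (aBack (r.set t (x, some 2)) t) (t + 1) = _
          rw [hback]
          exact hfwd
        have hnxt : (bNxtAux o 0).1[t]? = some (minEG o (t + 1)) := by
          rw [bNxtAux_fst_get o 0 t hto, minEG_eq_firstB]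
          simp
        have hB : bStep (bNxtAux o 0).1 (r, prev) t =
            ((match minEG o (t + 1) with
              | none => (match maxEL o t with | none => r.set t (x, some 2) | some p => backUpd (r.set t (x, some 2)) p)
              | some mm => fwdUpd (match maxEL o t with | none => r.set t (x, some 2) | some p => backUpd (r.set t (x, some 2)) p) mm), prev) := by
          simp only [bStep, hx, if_pos ht, hnxt, hprev]
          rw [Prod.mk.injEq]
          refine ⟨?_, rfl⟩
          cases maxEL o t <;> cases minEG o (t + 1) <;> rfl
        rw [hA, hB]
        have hl3 : (match minEG o (t + 1) with
              | none => (match maxEL o t with | none => r.set t (x, some 2) | some p => backUpd (r.set t (x, some 2)) p)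
              | some mm => fwdUpd (match maxEL o t with | none => r.set t (x, some 2) | some p => backUpd (r.set t (x, some 2)) p) mm).length = o.length := by
          cases minEG o (t + 1) with
          | none => exact hl2
          | some mm => rw [fwdUpd_length]; exact hl2
        have hprof3 : ∀ i, eligAt (match minEG o (t + 1) with
              | none => (match maxEL o t with | none => r.set t (x, some 2) | some p => backUpd (r.set t (x, some 2)) p)
              | some mm => fwdUpd (match maxEL o t with | none => r.set t (x, some 2) | some p => backUpd (r.set t (x, some 2)) p) mm) i = eligAt o i := by
          intro i
          cases minEG o (t + 1) with
          | none => exact hprof2 i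
          | some mm => rw [fwdUpd_prof]; exact hprof2 i
        have hun3 : ∀ i, t + 1 ≤ i → eligAt o i = false →
            (match minEG o (t + 1) with
              | none => (match maxEL o t with | none => r.set t (x, some 2) | some p => backUpd (r.set t (x, some 2)) p)
              | some mm => fwdUpd (match maxEL o t with | none => r.set t (x, some 2) | some p => backUpd (r.set t (x, some 2)) p) mm)[i]? = o[i]? := by
          intro i hi hoe
          have base : _ := hget2_ne i hi hoe
          have tail : r[i]? = o[i]? := hun i (by omega) hoe
          cases hmG : minEG o (t + 1) with
          | none => rw [base, tail]
          | some mm =>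
            have hem : eligAt o mm = true := minEG_some_elig o (t + 1) mm hmG
            rw [fwdUpd_get_ne _ mm i (fun e => by rw [e] at hoe; rw [hoe] at hem; exact Bool.false_ne_true hem), base, tail]
        apply ih o _ (t + 1) prev (by omega) hl3 hprof3 hun3
        rw [hprev]; simp [maxEL, hot]


theorem route_eq (o : List (Int × Option Int)) :
    (List.range' 1 (o.length - 1)).foldl aStep o = bRoute o := by
  unfold bRoute
  cases hn : o.length with
  | zero =>
    rw [List.length_eq_zero_iff.mp hn]
    rfl
  | succ n' =>
    rw [List.range_eq_range', show List.range' 0 (n' + 1) = 0 :: List.range' 1 n' from rfl,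
      List.foldl_cons]
    have h0 : o[0]? = some o[0] := List.getElem?_eq_getElem (by omega)
    rcases hp : o[0] with ⟨x, v⟩
    have hg : o[0]? = some (x, v) := by rw [h0, hp]
    have hfirst : bStep (bNxtAux o 0).1 (o, none) 0 = (o, maxEL o 1) := by
      cases v with
      | none => simp [bStep, hg, maxEL, eligAt, bElig]
      | some w =>
        by_cases hw : w ≠ 2 ∧ w ≠ 4
        · simp [bStep, hg, maxEL, eligAt, bElig, hw.1, hw.2]
        · have hb : bElig (some w) = false := by
            simp only [bElig]
            rcases not_and_or.mp hw with h | h <;> simp [not_not.mp h]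
          simp [bStep, hg, maxEL, eligAt, hb, hw]
    rw [hfirst]
    have hmain := main_loop n' o o 1 (maxEL o 1) le_rfl rfl (fun i => rfl) (fun i _ _ => rfl) rfl
    simpa using hmain


-- ===== VERDICT (by name: the statement is the Claim_ definition above) =====
theorem drone_repair_visit_type_update_spec : Claim_equal_drone_repair_visit_type_update := by
  intro routes _
  unfold Spec_drone_repair_visit_type_update drone_repair_visit_type_update drone_repair_visit_type_update_alt
  exact List.map_congr_left (fun o _ => route_eq o)
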